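-- pv_equiv track=rewrite | github.com/niblings/hooty | src/hooty/tools/apply_patch.py | _find_context_line
-- ===== SOURCE A (Python) =====
-- def _find_context_line(file_lines: list[str], context: str, start_hint: int = 0) -> int:
--     """Find the line matching the @@ context marker via fuzzy matching.
--
--     Returns the 0-based line index, or -1 if not found.
--     """
--     if not context:
--         return start_hint
--
--     # Exact match
--     for idx in range(start_hint, len(file_lines)):
--         if file_lines[idx].rstrip() == context.rstrip():
--             return idx
--     # Retry from beginning if start_hint > 0
--     if start_hint > 0:
--         for idx in range(0, start_hint):
--             if file_lines[idx].rstrip() == context.rstrip():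
--                 return idx
--
--     # Fuzzy match — stripped whitespace
--     stripped_ctx = context.strip()
--     for idx in range(start_hint, len(file_lines)):
--         if file_lines[idx].strip() == stripped_ctx:
--             return idx
--     if start_hint > 0:
--         for idx in range(0, start_hint):
--             if file_lines[idx].strip() == stripped_ctx:
--                 return idx
--
--     # Fuzzy match — contains
--     if len(stripped_ctx) > 5:
--         for idx in range(start_hint, len(file_lines)):
--             if stripped_ctx in file_lines[idx]:
--                 return idx
--         if start_hint > 0:
--             for idx in range(0, start_hint):
--                 if stripped_ctx in file_lines[idx]:
--                     return idx
--
--     return -1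
-- ===== SOURCE B (Python) =====
-- def _find_context_line(file_lines: list[str], context: str, start_hint: int = 0) -> int:
--     """Find the line matching the @@ context marker via fuzzy matching.
--
--     Returns the 0-based line index, or -1 if not found.
--     """
--     if not context:
--         return start_hint
--
--     # Single pass over the file: for each predicate keep the match whose
--     # rotated distance from start_hint is smallest, then pick by priority.
--     n = len(file_lines)
--     rctx = context.rstrip()
--     sctx = context.strip()
--     use_contains = len(sctx) > 5
--     best_exact = best_strip = best_contains = None  # (rank, idx)
--     for idx, line in enumerate(file_lines):
--         rank = (idx - start_hint) % n
--         if line.rstrip() == rctx and (best_exact is None or (rank, idx) < best_exact):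
--             best_exact = (rank, idx)
--         if line.strip() == sctx and (best_strip is None or (rank, idx) < best_strip):
--             best_strip = (rank, idx)
--         if use_contains and sctx in line and (best_contains is None or (rank, idx) < best_contains):
--             best_contains = (rank, idx)
--     for best in (best_exact, best_strip, best_contains):
--         if best is not None:
--             return best[1]
--     return -1
-- ===== Notes on version B (the rewrite author's own statement) =====
-- stated objective: alternative
-- what changed: Replaces A's six staged wraparound scans (three predicates, each a forward scan plus a guarded retry-from-start scan) by a single pass over the file in natural order that keeps, for each predicate, the match minimizing rotated distance from start_hint, then picks by predicate priority.
-- outside the precondition, e.g. on _find_context_line(['a', 'b'], 'b', -1): A returns -1, B returns 1; on _find_context_line(['a ', 'a'], 'a', 3): A returns 0, B returns 1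
import Mathlib
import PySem

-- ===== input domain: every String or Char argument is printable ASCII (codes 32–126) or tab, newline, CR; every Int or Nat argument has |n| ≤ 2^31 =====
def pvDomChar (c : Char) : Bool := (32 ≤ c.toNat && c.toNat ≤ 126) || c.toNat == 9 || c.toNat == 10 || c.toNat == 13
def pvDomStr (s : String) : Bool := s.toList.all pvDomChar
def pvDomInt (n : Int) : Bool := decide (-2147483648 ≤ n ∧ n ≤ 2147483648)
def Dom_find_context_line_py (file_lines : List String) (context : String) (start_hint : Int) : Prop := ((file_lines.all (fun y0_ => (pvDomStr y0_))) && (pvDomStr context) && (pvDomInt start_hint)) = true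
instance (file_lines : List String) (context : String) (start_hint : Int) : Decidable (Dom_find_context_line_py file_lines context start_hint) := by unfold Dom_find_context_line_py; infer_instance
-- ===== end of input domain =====

-- B replaces A's six staged wraparound scans by a single pass over the file that keeps, for each
-- of the three match predicates, the match minimizing rotated distance from start_hint, then
-- picks by predicate priority (objective: alternative). Same return value wherever A returns
-- inside Pre_ (start hint within the file, the natural domain of a 0-based line hint).


-- ===== PORT A =====
-- 'for idx in <idxs>: if p(file_lines[idx]): return idx' — scans the index list in order.
-- file_lines[idx] is PySem.List.pyGetD with default "": inside Pre_ every scanned index is in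
-- range, where pyGetD is exact.
def pvScanA (file_lines : List String) (p : String → Bool) : List Int → Option Int
  | [] => none
  | i :: rest =>
    if p (PySem.List.pyGetD file_lines i "") then some i else pvScanA file_lines p rest

def find_context_line_py (file_lines : List String) (context : String) (start_hint : Int) : Int :=
  if context == "" then start_hint
  else
    let n : Int := file_lines.length
    -- Exact match, then retry from beginning if start_hint > 0
    match pvScanA file_lines
        (fun line => PySem.Str.rstrip line == PySem.Str.rstrip context)
        (PySem.List.pyRange start_hint n 1) with
    | some i => i
    | none =>
      match (if start_hint > 0 then
              pvScanA file_lines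
                (fun line => PySem.Str.rstrip line == PySem.Str.rstrip context)
                (PySem.List.pyRange 0 start_hint 1)
             else none) with
      | some i => i
      | none =>
        -- Fuzzy match — stripped whitespace
        let stripped_ctx := PySem.Str.strip context
        match pvScanA file_lines
            (fun line => PySem.Str.strip line == stripped_ctx)
            (PySem.List.pyRange start_hint n 1) with
        | some i => i
        | none =>
          match (if start_hint > 0 then
                  pvScanA file_lines
                    (fun line => PySem.Str.strip line == stripped_ctx)
                    (PySem.List.pyRange 0 start_hint 1)
                 else none) with
          | some i => i
          | none =>
            -- Fuzzy match — contains (gated on len(stripped_ctx) > 5)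
            if PySem.Str.len stripped_ctx > 5 then
              match pvScanA file_lines
                  (fun line => PySem.Str.isIn stripped_ctx line)
                  (PySem.List.pyRange start_hint n 1) with
              | some i => i
              | none =>
                match (if start_hint > 0 then
                        pvScanA file_lines
                          (fun line => PySem.Str.isIn stripped_ctx line)
                          (PySem.List.pyRange 0 start_hint 1)
                       else none) with
                | some i => i
                | none => -1
            else -1

-- ===== PORT B =====
-- '(rank, idx) < best' — Python tuple comparison, lexicographic
def pvLtB (x y : Int × Int) : Bool := decide (x.1 < y.1 ∨ (x.1 = y.1 ∧ x.2 < y.2))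

-- 'if hit and (best is None or (rank, idx) < best): best = (rank, idx)'
def pvUpd (hit : Bool) (cand : Int × Int) : Option (Int × Int) → Option (Int × Int)
  | none => if hit then some cand else none
  | some c => if hit && pvLtB cand c then some cand else some c

-- one iteration of B's single pass: update the three accumulators for line q.2 at index q.1
def pvStep (rctx sctx : String) (useContains : Bool) (s n : Int)
    (b : Option (Int × Int) × Option (Int × Int) × Option (Int × Int)) (q : Int × String) :
    Option (Int × Int) × Option (Int × Int) × Option (Int × Int) :=
  let rank := PySem.Int.mod (q.1 - s) n
  (pvUpd (PySem.Str.rstrip q.2 == rctx) (rank, q.1) b.1,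
   pvUpd (PySem.Str.strip q.2 == sctx) (rank, q.1) b.2.1,
   pvUpd (useContains && PySem.Str.isIn sctx q.2) (rank, q.1) b.2.2)

-- 'for best in (be, bs, bc): if best is not None: return best[1]' then -1
def pvPick : List (Option (Int × Int)) → Int
  | [] => -1
  | some c :: _ => c.2
  | none :: rest => pvPick rest

def find_context_line_py_alt (file_lines : List String) (context : String) (start_hint : Int) : Int :=
  if context == "" then start_hint
  else
    let n : Int := file_lines.length
    let rctx := PySem.Str.rstrip context
    let sctx := PySem.Str.strip context
    let useContains : Bool := decide (5 < PySem.Str.len sctx)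
    let st := (PySem.List.enumerate file_lines 0).foldl
        (pvStep rctx sctx useContains start_hint n) (none, none, none)
    pvPick [st.1, st.2.1, st.2.2]

-- ===== PRECONDITION & SPEC =====
-- Pre_ restricts start_hint to the natural domain of a 0-based line hint, 0 ≤ hint ≤ len:
-- a negative hint makes A scan negative indexes (Python wraparound) and return a NEGATIVE index
-- (conflated with the -1 not-found sentinel), and a hint past the end makes A's retry loop raise
-- IndexError unless an exact match happens to occur first — both accidents of A's loop bounds.
def Pre_find_context_line_py (file_lines : List String) (context : String) (start_hint : Int) : Prop :=
  context = "" ∨ (0 ≤ start_hint ∧ start_hint ≤ (file_lines.length : Int))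
instance (file_lines : List String) (context : String) (start_hint : Int) : Decidable (Pre_find_context_line_py file_lines context start_hint) := by unfold Pre_find_context_line_py; infer_instance

def pvWitness_find_context_line_py : List String × String × Int := (["hello ", "  world"], "hello", 1)

def Spec_find_context_line_py (file_lines : List String) (context : String) (start_hint : Int) (out : Int) : Prop := out = find_context_line_py_alt file_lines context start_hint
instance (file_lines : List String) (context : String) (start_hint : Int) (out : Int) : Decidable (Spec_find_context_line_py file_lines context start_hint out) := by unfold Spec_find_context_line_py; infer_instance

-- ===== CLAIM (what is proved, stated in full; the proofs are below) =====
def Claim_equal_find_context_line_py : Prop := ∀ (file_lines : List String) (context : String) (start_hint : Int), Dom_find_context_line_py file_lines context start_hint → Pre_find_context_line_py file_lines context start_hint → Spec_find_context_line_py file_lines context start_hint (find_context_line_py file_lines context start_hint)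

-- ===== LEMMAS AND PROOFS =====

-- scanning a concatenated index list = scan the first part, else the second
theorem pvScanA_append (file_lines : List String) (p : String → Bool) (xs ys : List Int) :
    pvScanA file_lines p (xs ++ ys) =
      (pvScanA file_lines p xs).elim (pvScanA file_lines p ys) some := by
  induction xs with
  | nil => rfl
  | cons i rest ih =>
    by_cases h : p (PySem.List.pyGetD file_lines i "") <;>
      simp [pvScanA, h, ih]

-- A's guarded retry scan equals the unguarded scan: for start_hint ≤ 0 the range is empty
theorem pvGuard_eq (file_lines : List String) (p : String → Bool) (start_hint : Int) :
    (if start_hint > 0 then pvScanA file_lines p (PySem.List.pyRange 0 start_hint 1) else none)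
      = pvScanA file_lines p (PySem.List.pyRange 0 start_hint 1) := by
  by_cases h : start_hint > 0
  · simp [h]
  · simp [h, PySem.List.pyRange_one_eq_nil (by omega : start_hint ≤ 0), pvScanA]

-- one of A's match phases (forward scan, guarded retry scan, else continue with k)
-- equals a single scan of the wrapped order
theorem pvPhase (file_lines : List String) (p : String → Bool) (s n k : Int) :
    (match pvScanA file_lines p (PySem.List.pyRange s n 1) with
     | some i => i
     | none =>
       match (if s > 0 then pvScanA file_lines p (PySem.List.pyRange 0 s 1) else none) with
       | some i => i
       | none => k)
    = match pvScanA file_lines p (PySem.List.pyRange s n 1 ++ PySem.List.pyRange 0 s 1) with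
      | some i => i
      | none => k := by
  rw [pvScanA_append, pvGuard_eq]
  cases pvScanA file_lines p (PySem.List.pyRange s n 1) <;> simp

-- the smaller of two (rank, idx) candidates under pvLtB (proof-only view of pvUpd)
def minP (x y : Int × Int) : Int × Int := if pvLtB x y then x else y

theorem minP_left_comm (x y z : Int × Int) : minP x (minP y z) = minP y (minP x z) := by
  unfold minP pvLtB
  split_ifs <;> simp_all only [decide_eq_true_eq, not_or, not_and, not_lt, Prod.ext_iff] <;> omega

theorem minP_comm (x y : Int × Int) : minP x y = minP y x := by
  unfold minP pvLtB
  split_ifs <;> simp_all only [decide_eq_true_eq, not_or, not_and, not_lt, Prod.ext_iff] <;> omega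

theorem minP_idem (x : Int × Int) : minP x x = x := by
  simp [minP, ite_self]

theorem pvUpd_true (cand : Int × Int) (b : Option (Int × Int)) :
    pvUpd true cand b = some (minP cand (b.getD cand)) := by
  cases b with
  | none => simp [pvUpd, minP, ite_self]
  | some c =>
    simp only [pvUpd, Bool.true_and, Option.getD_some, minP]
    split <;> rfl

theorem pvUpd_false (cand : Int × Int) (b : Option (Int × Int)) : pvUpd false cand b = b := by
  cases b <;> simp [pvUpd]

-- B's accumulator update is left-commutative (the min of a strict total order)
theorem pvUpd_comm (h1 h2 : Bool) (c1 c2 : Int × Int) (b : Option (Int × Int)) :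
    pvUpd h2 c2 (pvUpd h1 c1 b) = pvUpd h1 c1 (pvUpd h2 c2 b) := by
  cases h1 <;> cases h2 <;> simp only [pvUpd_false, pvUpd_true]
  cases b with
  | none =>
    simp only [Option.getD_some, Option.getD_none, minP_idem]
    exact congrArg some (minP_comm c2 c1)
  | some c =>
    simp only [Option.getD_some]
    exact congrArg some (minP_left_comm c2 c1 c)

-- B's triple fold splits into three independent component folds
theorem pvStep_foldl_split (rctx sctx : String) (uc : Bool) (s n : Int)
    (l : List (Int × String)) (b1 b2 b3 : Option (Int × Int)) :
    l.foldl (pvStep rctx sctx uc s n) (b1, b2, b3) =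
      (l.foldl (fun b q => pvUpd (PySem.Str.rstrip q.2 == rctx) (PySem.Int.mod (q.1 - s) n, q.1) b) b1,
       l.foldl (fun b q => pvUpd (PySem.Str.strip q.2 == sctx) (PySem.Int.mod (q.1 - s) n, q.1) b) b2,
       l.foldl (fun b q => pvUpd (uc && PySem.Str.isIn sctx q.2) (PySem.Int.mod (q.1 - s) n, q.1) b) b3) := by
  induction l generalizing b1 b2 b3 with
  | nil => rfl
  | cons q rest ih => simp [pvStep, ih]

-- once the accumulator holds a candidate ranked below everything ahead, the fold keeps it
theorem pvFold_keeps (xs : List String) (p : String → Bool) (s n : Int) (c : Int × Int)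
    (l : List Int) (hlt : ∀ j ∈ l, c.1 < PySem.Int.mod (j - s) n) :
    l.foldl (fun b j => pvUpd (p (PySem.List.pyGetD xs j "")) (PySem.Int.mod (j - s) n, j) b) (some c)
      = some c := by
  induction l with
  | nil => rfl
  | cons j rest ih =>
    have hj := hlt j (by simp)
    have hkeep : pvUpd (p (PySem.List.pyGetD xs j "")) (PySem.Int.mod (j - s) n, j) (some c)
        = some c := by
      have hfalse : pvLtB (PySem.Int.mod (j - s) n, j) c = false := by
        simp only [pvLtB, decide_eq_false_iff_not]
        omega
      simp [pvUpd, hfalse]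
    simp only [List.foldl_cons, hkeep]
    exact ih (fun j hj => hlt j (by simp [hj]))

-- over an index list visited in strictly increasing rank order, B's min-rank fold
-- finds exactly the first match of A's scan
theorem pvFold_eq_scan (xs : List String) (p : String → Bool) (s n : Int) (l : List Int)
    (hp : l.Pairwise (fun i j => PySem.Int.mod (i - s) n < PySem.Int.mod (j - s) n)) :
    l.foldl (fun b j => pvUpd (p (PySem.List.pyGetD xs j "")) (PySem.Int.mod (j - s) n, j) b) none
      = (pvScanA xs p l).map (fun i => (PySem.Int.mod (i - s) n, i)) := by
  induction l with
  | nil => rfl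
  | cons i rest ih =>
    rw [List.pairwise_cons] at hp
    by_cases hpi : p (PySem.List.pyGetD xs i "")
    · simp only [List.foldl_cons, pvScanA, hpi, if_true, pvUpd, Option.map_some]
      exact pvFold_keeps xs p s n _ rest (fun j hj => hp.1 j hj)
    · simp only [List.foldl_cons, pvScanA, hpi, if_false, pvUpd, Bool.false_eq_true]
      exact ih hp.2

-- the rank of an index: below the hint it wraps, at or above it does not
theorem pvRank_hi (s n i : Int) (hs : 0 ≤ s) (hi : s ≤ i) (hin : i < n) :
    PySem.Int.mod (i - s) n = i - s := by
  rw [PySem.Int.mod_eq_emod_of_pos (by omega)]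
  exact Int.emod_eq_of_lt (by omega) (by omega)

theorem pvRank_lo (s n i : Int) (hi : 0 ≤ i) (his : i < s) (hsn : s ≤ n) :
    PySem.Int.mod (i - s) n = i - s + n := by
  rw [PySem.Int.mod_eq_emod_of_pos (by omega)]
  have h1 : (i - s + n * 1) % n = (i - s) % n := Int.add_mul_emod_self_left (i - s) n 1
  rw [mul_one] at h1
  rw [← h1]
  exact Int.emod_eq_of_lt (by omega) (by omega)

-- A's wrapped scan order is strictly increasing in rank
theorem pvOrder_pairwise (s n : Int) (hs : 0 ≤ s) (hsn : s ≤ n) :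
    (PySem.List.pyRange s n 1 ++ PySem.List.pyRange 0 s 1).Pairwise
      (fun i j => PySem.Int.mod (i - s) n < PySem.Int.mod (j - s) n) := by
  rw [List.pairwise_append]
  refine ⟨?_, ?_, ?_⟩
  · refine (PySem.List.pairwise_lt_pyRange_one s n).imp_of_mem ?_
    intro a b ha hb hab
    rw [PySem.List.mem_pyRange_one] at ha hb
    rw [pvRank_hi s n a hs ha.1 ha.2, pvRank_hi s n b hs hb.1 hb.2]
    omega
  · refine (PySem.List.pairwise_lt_pyRange_one 0 s).imp_of_mem ?_
    intro a b ha hb hab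
    rw [PySem.List.mem_pyRange_one] at ha hb
    rw [pvRank_lo s n a ha.1 ha.2 hsn, pvRank_lo s n b hb.1 hb.2 hsn]
    omega
  · intro a ha b hb
    rw [PySem.List.mem_pyRange_one] at ha hb
    rw [pvRank_hi s n a hs ha.1 ha.2, pvRank_lo s n b hb.1 hb.2 hsn]
    omega

-- core bridge: B's one-pass min-rank fold over the file = A's scan of the wrapped order
theorem pvCore (xs : List String) (p : String → Bool) (s : Int)
    (hs : 0 ≤ s) (hsn : s ≤ (xs.length : Int)) :
    (PySem.List.enumerate xs 0).foldl
        (fun b q => pvUpd (p q.2) (PySem.Int.mod (q.1 - s) (xs.length : Int), q.1) b) none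
      = (pvScanA xs p (PySem.List.pyRange s (xs.length : Int) 1 ++ PySem.List.pyRange 0 s 1)).map
          (fun i => (PySem.Int.mod (i - s) (xs.length : Int), i)) := by
  rw [PySem.List.enumerate_eq_map_pyRange xs ""]
  rw [List.foldl_map]
  have hperm : (PySem.List.pyRange 0 (PySem.List.len xs) 1).Perm
      (PySem.List.pyRange s (xs.length : Int) 1 ++ PySem.List.pyRange 0 s 1) := by
    rw [PySem.List.len_eq,
      PySem.List.pyRange_one_append 0 s (xs.length : Int) hs hsn]
    exact List.perm_append_comm
  rw [List.Perm.foldl_eq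
    (rcomm := ⟨fun b a1 a2 => pvUpd_comm _ _ _ _ b⟩) hperm none]
  exact pvFold_eq_scan xs p s (xs.length : Int) _
    (pvOrder_pairwise s (xs.length : Int) hs hsn)

-- a predicate that is constantly false leaves the accumulator untouched
theorem pvFold_false (s n : Int) (l : List (Int × String)) :
    l.foldl (fun b (q : Int × String) => pvUpd false (PySem.Int.mod (q.1 - s) n, q.1) b) none
      = (none : Option (Int × Int)) := by
  induction l with
  | nil => rfl
  | cons q rest ih => simpa [pvUpd] using ih

-- ===== VERDICT (by name: the statement is the Claim_ definition above) =====
theorem find_context_line_py_spec : Claim_equal_find_context_line_py := by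
  intro file_lines context start_hint _ hpre
  unfold Spec_find_context_line_py find_context_line_py find_context_line_py_alt
  by_cases hc : context == ""
  · simp [hc]
  · have hctx : context ≠ "" := by simpa using hc
    rcases hpre with h | ⟨hs, hsn⟩
    · exact absurd h hctx
    simp only [hc, Bool.false_eq_true, if_false]
    rw [pvStep_foldl_split]
    rw [pvPhase, pvPhase, pvPhase]
    rw [pvCore file_lines (fun line => PySem.Str.rstrip line == PySem.Str.rstrip context) start_hint hs hsn]
    rw [pvCore file_lines (fun line => PySem.Str.strip line == PySem.Str.strip context) start_hint hs hsn]
    by_cases hg : 5 < PySem.Str.len (PySem.Str.strip context)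
    · simp only [hg, decide_true, Bool.true_and, if_true]
      rw [pvCore file_lines (fun line => PySem.Str.isIn (PySem.Str.strip context) line) start_hint hs hsn]
      cases pvScanA file_lines (fun line => PySem.Str.rstrip line == PySem.Str.rstrip context)
          (PySem.List.pyRange start_hint (file_lines.length : Int) 1 ++ PySem.List.pyRange 0 start_hint 1) <;>
        cases pvScanA file_lines (fun line => PySem.Str.strip line == PySem.Str.strip context)
          (PySem.List.pyRange start_hint (file_lines.length : Int) 1 ++ PySem.List.pyRange 0 start_hint 1) <;>
        cases pvScanA file_lines (fun line => PySem.Str.isIn (PySem.Str.strip context) line)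
          (PySem.List.pyRange start_hint (file_lines.length : Int) 1 ++ PySem.List.pyRange 0 start_hint 1) <;>
        simp [pvPick]
    · simp only [hg, decide_false, Bool.false_and, if_false]
      rw [pvFold_false]
      cases pvScanA file_lines (fun line => PySem.Str.rstrip line == PySem.Str.rstrip context)
          (PySem.List.pyRange start_hint (file_lines.length : Int) 1 ++ PySem.List.pyRange 0 start_hint 1) <;>
        cases pvScanA file_lines (fun line => PySem.Str.strip line == PySem.Str.strip context)
          (PySem.List.pyRange start_hint (file_lines.length : Int) 1 ++ PySem.List.pyRange 0 start_hint 1) <;>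
        simp [pvPick]
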